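-- pv_equiv track=rewrite | github.com/MelanieOT7/Test_001_Prep | student_code.py | sum_unique_elements
-- ===== SOURCE A (Python) =====
-- def sum_unique_elements(elements: list):
--     """
--     Calculate the sum of unique elements in a list.
--
--     Parameters:
--     elements (list): A list of integers.
--
--     Returns:
--     int: The sum of unique integers in the list.
--     """
--
--     """_elements = sorted(elements)
--     for element in _elements:
--         count += element
--         _elements.remove(element)
--         if element in _elements:
--             _elements.remove(element)
--         else:
--             continue
--
--     return count"""
--     count = 0
--     _set = set(elements)
--     for num in _set:
--         count+=num
--     return count
-- ===== SOURCE B (Python) =====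
-- def sum_unique_elements(elements: list):
--     total = 0
--     prev = None
--     for x in sorted(elements):
--         if prev is None or x != prev:
--             total += x
--         prev = x
--     return total
-- ===== Notes on version B (the rewrite author's own statement) =====
-- stated objective: alternative
-- what changed: B sorts the list and sums while skipping adjacent duplicates, instead of building a hash set and summing over it.
import Mathlib
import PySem

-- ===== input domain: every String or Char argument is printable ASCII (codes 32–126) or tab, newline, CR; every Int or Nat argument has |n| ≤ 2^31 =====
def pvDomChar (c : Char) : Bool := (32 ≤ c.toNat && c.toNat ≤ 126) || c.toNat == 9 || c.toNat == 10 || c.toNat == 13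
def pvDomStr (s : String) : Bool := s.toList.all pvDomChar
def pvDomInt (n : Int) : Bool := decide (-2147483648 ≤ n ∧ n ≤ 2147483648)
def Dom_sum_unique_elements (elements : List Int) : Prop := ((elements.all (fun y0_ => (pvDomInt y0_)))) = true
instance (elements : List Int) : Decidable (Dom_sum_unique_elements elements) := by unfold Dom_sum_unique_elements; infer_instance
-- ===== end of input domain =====

-- B sums the sorted list while skipping adjacent duplicates instead of building a set; alternative decomposition, return value identical.

-- ===== PORT A =====
-- count = 0; _set = set(elements); for num in _set: count += num; return count
def sum_unique_elements (elements : List Int) : Int :=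
  (PySem.Set.ofList elements : PySem.Set Int).foldl (fun count num => count + num) 0

-- ===== PORT B =====
-- for x in sorted(elements): if prev is None or x != prev: total += x; prev = x
def sumAdjGo : List Int → Option Int → Int → Int
  | [], _, total => total
  | x :: rest, prev, total =>
      sumAdjGo rest (some x) (if prev = none ∨ some x ≠ prev then total + x else total)

def sum_unique_elements_alt (elements : List Int) : Int :=
  sumAdjGo (PySem.List.sorted elements (fun x => x) false) none 0

-- ===== PRECONDITION & SPEC =====
def Spec_sum_unique_elements (elements : List Int) (out : Int) : Prop := out = sum_unique_elements_alt elements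
instance (elements : List Int) (out : Int) : Decidable (Spec_sum_unique_elements elements out) := by unfold Spec_sum_unique_elements; infer_instance

-- ===== CLAIM (what is proved, stated in full; the proofs are below) =====
def Claim_equal_sum_unique_elements : Prop := ∀ (elements : List Int), Dom_sum_unique_elements elements → Spec_sum_unique_elements elements (sum_unique_elements elements)

-- ===== LEMMAS AND PROOFS =====

-- the values B actually adds: adjacent-duplicate-free subsequence, threading the previous element
def dAdj : List Int → Option Int → List Int
  | [], _ => []
  | x :: xs, p => if p = some x then dAdj xs (some x) else x :: dAdj xs (some x)

theorem sumAdjGo_eq_sum (xs : List Int) : ∀ (p : Option Int) (t : Int),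
    sumAdjGo xs p t = t + (dAdj xs p).sum := by
  induction xs with
  | nil => intro p t; simp [sumAdjGo, dAdj]
  | cons x rest ih =>
    intro p t
    by_cases h : p = some x
    · simp [sumAdjGo, dAdj, h, ih]
    · have h2 : p = none ∨ some x ≠ p := by
        cases p with
        | none => exact Or.inl rfl
        | some q => exact Or.inr (fun hq => h (by simp_all))
      simp [sumAdjGo, dAdj, h, h2, ih]
      ring

theorem mem_dAdj (xs : List Int) : ∀ (p : Option Int),
    xs.Pairwise (· ≤ ·) → (∀ q, p = some q → ∀ y ∈ xs, q ≤ y) →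
    (∀ a, a ∈ dAdj xs p ↔ a ∈ xs ∧ p ≠ some a) := by
  induction xs with
  | nil => intro p _ _ a; simp [dAdj]
  | cons x rest ih =>
    intro p hpw hp a
    have hx : ∀ y ∈ rest, x ≤ y := (List.pairwise_cons.mp hpw).1
    have hrest := (List.pairwise_cons.mp hpw).2
    have ihx := ih (some x) hrest (fun q hq y hy => by cases hq; exact hx y hy) a
    by_cases h : p = some x
    · subst h
      simp only [dAdj]
      rw [if_pos trivial, ihx]
      constructor
      · rintro ⟨ha, hne⟩
        exact ⟨List.mem_cons_of_mem _ ha, hne⟩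
      · rintro ⟨ha, hne⟩
        rcases List.mem_cons.mp ha with h1 | h1
        · exact absurd (by rw [h1]) hne
        · exact ⟨h1, hne⟩
    · simp only [dAdj, if_neg h, List.mem_cons, ihx]
      constructor
      · rintro (rfl | ⟨ha, hne⟩)
        · exact ⟨Or.inl rfl, fun hpa => h hpa⟩
        · refine ⟨Or.inr ha, ?_⟩
          rintro rfl
          have hax : a ≤ x := hp a rfl x (List.mem_cons_self ..)
          have hxa : x ≤ a := hx a ha
          exact (hne (by simp [le_antisymm hax hxa])) 
      · rintro ⟨(rfl | ha), hne⟩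
        · exact Or.inl rfl
        · by_cases hax : a = x
          · exact Or.inl hax
          · exact Or.inr ⟨ha, by simpa [eq_comm] using hax⟩

theorem nodup_dAdj (xs : List Int) : ∀ (p : Option Int),
    xs.Pairwise (· ≤ ·) → (∀ q, p = some q → ∀ y ∈ xs, q ≤ y) →
    (dAdj xs p).Nodup := by
  induction xs with
  | nil => intro p _ _; simp [dAdj]
  | cons x rest ih =>
    intro p hpw hp
    have hx : ∀ y ∈ rest, x ≤ y := (List.pairwise_cons.mp hpw).1
    have hrest := (List.pairwise_cons.mp hpw).2
    have hx' : ∀ q, some x = some q → ∀ y ∈ rest, q ≤ y := fun q hq y hy => by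
      cases hq; exact hx y hy
    have hnd := ih (some x) hrest hx'
    by_cases h : p = some x
    · simpa [dAdj, h] using hnd
    · simp only [dAdj, if_neg h]
      refine List.nodup_cons.mpr ⟨?_, hnd⟩
      intro hmem
      have := (mem_dAdj rest (some x) hrest hx' x).mp hmem
      exact this.2 rfl

-- ===== VERDICT (by name: the statement is the Claim_ definition above) =====
theorem sum_unique_elements_spec : Claim_equal_sum_unique_elements := by
  intro elements _
  unfold Spec_sum_unique_elements sum_unique_elements sum_unique_elements_alt
  set s := PySem.List.sorted elements (fun x => x) false with hs
  have hpw : s.Pairwise (· ≤ ·) := PySem.List.sorted_pairwise elements (fun x => x)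
  have hnone : ∀ q, (none : Option Int) = some q → ∀ y ∈ s, q ≤ y := by simp
  rw [sumAdjGo_eq_sum, zero_add]
  rw [show (fun (count num : Int) => count + num) = (· + ·) from rfl, ← List.sum_eq_foldl]
  refine List.Perm.sum_eq ?_
  apply (List.perm_ext_iff_of_nodup (PySem.Set.nodup_ofList elements)
    (nodup_dAdj s none hpw hnone)).mpr
  intro a
  rw [PySem.Set.mem_ofList, mem_dAdj s none hpw hnone a]
  simp [hs, PySem.List.mem_sorted]
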